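-- pv_equiv track=rewrite | github.com/kascheri12/golem_util | analyze_charges.py | cleanse_data
-- ===== SOURCE A (Python) =====
-- def cleanse_data(d):
--   data_set = []
--   new_d = []
--   for row in d['output20170921']:
--     for j in range(len(row)):
--       if j not in (8,9,10):
--         new_d.append(row)
--   data_set.append(new_d)
--   new_d = []
--   for row in d['output20170922']:
--     for j in range(len(row)):
--       if j not in (8,9,10):
--         new_d.append(row)
--   data_set.append(new_d)
--   return data_set
-- ===== SOURCE B (Python) =====
-- def cleanse_data(d):
--   def expand(rows):
--     out = []
--     for row in rows:
--       n = len(row)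
--       count = n - len([i for i in (8, 9, 10) if i < n])
--       out.extend([row] * count)
--     return out
--   return [expand(d['output20170921']), expand(d['output20170922'])]
-- ===== Notes on version B (the rewrite author's own statement) =====
-- stated objective: simpler
-- what changed: The inner per-index loop over every column of a row is replaced by a closed-form repeat count (row length minus how many of the indices 8,9,10 are in range) and a single extend with the replicated row; the two key blocks are unified into one helper.
import Mathlib
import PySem

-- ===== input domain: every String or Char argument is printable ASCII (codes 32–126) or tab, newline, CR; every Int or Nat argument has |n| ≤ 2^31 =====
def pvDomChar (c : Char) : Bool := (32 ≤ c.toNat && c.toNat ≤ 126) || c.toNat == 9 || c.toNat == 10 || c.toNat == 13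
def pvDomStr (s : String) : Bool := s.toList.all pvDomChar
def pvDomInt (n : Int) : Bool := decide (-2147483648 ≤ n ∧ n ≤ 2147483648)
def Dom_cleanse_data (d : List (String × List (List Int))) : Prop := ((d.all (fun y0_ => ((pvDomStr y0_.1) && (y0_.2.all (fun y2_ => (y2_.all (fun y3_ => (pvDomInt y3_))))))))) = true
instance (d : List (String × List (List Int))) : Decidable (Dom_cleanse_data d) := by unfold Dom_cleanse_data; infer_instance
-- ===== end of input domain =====

-- B replaces A's inner per-index loop by a closed-form repeat count and one extend (objective: simpler).

-- ===== PORT A =====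
-- A: for each of the two keys, for each row, for j in range(len(row)): if j not in (8,9,10): new_d.append(row)
def cleanse_data (d : List (String × List (List Int))) : List (List (List Int)) :=
  let dd := PySem.Dict.ofList d
  let new_d1 := ((dd.get? "output20170921").getD []).foldl
    (fun nd row => (PySem.List.pyRange 0 (row.length : Int) 1).foldl
      (fun nd2 j => if !(j == 8 || j == 9 || j == 10) then nd2 ++ [row] else nd2) nd) []
  let new_d2 := ((dd.get? "output20170922").getD []).foldl
    (fun nd row => (PySem.List.pyRange 0 (row.length : Int) 1).foldl
      (fun nd2 j => if !(j == 8 || j == 9 || j == 10) then nd2 ++ [row] else nd2) nd) []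
  [new_d1, new_d2]

-- ===== PORT B =====
-- B: count = len(row) - len([i for i in (8,9,10) if i < len(row)]); out.extend([row]*count)
def pvExpand (rows : List (List Int)) : List (List Int) :=
  rows.foldl (fun out row =>
    out ++ List.replicate (row.length - (([8, 9, 10] : List Nat).filter (fun i => i < row.length)).length) row) []

def cleanse_data_alt (d : List (String × List (List Int))) : List (List (List Int)) :=
  let dd := PySem.Dict.ofList d
  [pvExpand ((dd.get? "output20170921").getD []), pvExpand ((dd.get? "output20170922").getD [])]

-- ===== PRECONDITION & SPEC =====
-- Pre_ excludes exactly the dicts missing one of the two keys, on which Python A raises KeyError.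
def Pre_cleanse_data (d : List (String × List (List Int))) : Prop :=
  (PySem.Dict.ofList d).contains "output20170921" = true ∧ (PySem.Dict.ofList d).contains "output20170922" = true
instance (d : List (String × List (List Int))) : Decidable (Pre_cleanse_data d) := by unfold Pre_cleanse_data; infer_instance
def pvWitness_cleanse_data : (List (String × List (List Int))) :=
  [("output20170921", [[1, 2], []]), ("output20170922", [[0]])]

def Spec_cleanse_data (d : List (String × List (List Int))) (out : List (List (List Int))) : Prop := out = cleanse_data_alt d
instance (d : List (String × List (List Int))) (out : List (List (List Int))) : Decidable (Spec_cleanse_data d out) := by unfold Spec_cleanse_data; infer_instance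

-- ===== CLAIM (what is proved, stated in full; the proofs are below) =====
def Claim_equal_cleanse_data : Prop := ∀ (d : List (String × List (List Int))), Dom_cleanse_data d → Pre_cleanse_data d → Spec_cleanse_data d (cleanse_data d)

-- ===== LEMMAS AND PROOFS =====

theorem pvCEq (n : Nat) : (([8, 9, 10] : List Nat).filter (fun i => i < n)).length
    = (if 8 < n then 1 else 0) + ((if 9 < n then 1 else 0) + (if 10 < n then 1 else 0)) := by
  simp only [List.filter_cons, List.filter_nil, decide_eq_true_eq]
  split_ifs <;> simp

theorem pvFilterLen (n : Nat) :
    ((PySem.List.pyRange 0 (n : Int) 1).filter (fun j => !(j == 8 || j == 9 || j == 10))).length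
      = n - (([8, 9, 10] : List Nat).filter (fun i => i < n)).length := by
  induction n with
  | zero => decide
  | succ m ih =>
    rw [show ((m + 1 : Nat) : Int) = (m : Int) + 1 by push_cast; ring,
        PySem.List.pyRange_one_succ_right (by positivity)]
    rw [List.filter_append, List.length_append, ih, pvCEq, pvCEq]
    have hsing : (([(m : Int)].filter (fun j => !(j == 8 || j == 9 || j == 10))).length)
        = if m = 8 ∨ m = 9 ∨ m = 10 then 0 else 1 := by
      simp only [List.filter_cons, List.filter_nil, Bool.not_eq_true']
      split_ifs <;> simp_all <;> omega
    rw [hsing]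
    split_ifs <;> omega

theorem pvRowLoop (row : List Int) (nd : List (List Int)) :
    (PySem.List.pyRange 0 (row.length : Int) 1).foldl
        (fun nd2 j => if !(j == 8 || j == 9 || j == 10) then nd2 ++ [row] else nd2) nd
      = nd ++ List.replicate (row.length - (([8, 9, 10] : List Nat).filter (fun i => i < row.length)).length) row := by
  rw [PySem.List.foldl_append_if (l := PySem.List.pyRange 0 (row.length : Int) 1)
      (p := fun j => !(j == 8 || j == 9 || j == 10)) (f := fun _ => row) (acc := nd)]
  congr 1
  rw [← pvFilterLen row.length, List.map_const']

theorem pvKeyLoop (rows : List (List Int)) (nd : List (List Int)) :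
    rows.foldl (fun nd row => (PySem.List.pyRange 0 (row.length : Int) 1).foldl
        (fun nd2 j => if !(j == 8 || j == 9 || j == 10) then nd2 ++ [row] else nd2) nd) nd
      = nd ++ pvExpand rows := by
  simp only [funext fun nd => funext fun row => pvRowLoop row nd, pvExpand]
  rw [PySem.List.foldl_append_eq_flatMap, PySem.List.foldl_append_eq_flatMap]
  simp

-- ===== VERDICT (by name: the statement is the Claim_ definition above) =====
theorem cleanse_data_spec : Claim_equal_cleanse_data := by
  intro d _ _
  unfold Spec_cleanse_data cleanse_data cleanse_data_alt
  simp only [pvKeyLoop, List.nil_append]
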